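-- pv_equiv track=rewrite | github.com/yimingzhang2026/MARL-multicell | 57device_celluar_network_benchmarks/env_backend.py | get_conflict_aps
-- ===== SOURCE A (Python) =====
-- def get_conflict_aps(intercell_conflict_links, cell_mapping, service_pool):
--     K = len(service_pool)
--     conflict_ap_neighbors=[[] for _ in range(K)]
--     for ap in range(K):#find all the aps it has conflict with
--         conflict_links = []
--         conflict_aps = []
--         for ue in service_pool[ap]:
--             if ue in intercell_conflict_links:
--                 for link in intercell_conflict_links[ue]:
--                     if link not in conflict_links:
--                         conflict_links.append(link)
--         for conflict_link in conflict_links: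
--             if cell_mapping[conflict_link] not in conflict_aps and cell_mapping[conflict_link] != ap:
--                 conflict_aps.append(cell_mapping[conflict_link])
--         conflict_ap_neighbors[ap] = conflict_aps
--     return conflict_ap_neighbors
-- ===== SOURCE B (Python) =====
-- def get_conflict_aps(intercell_conflict_links, cell_mapping, service_pool):
--     conflict_ap_neighbors = []
--     for ap, pool in enumerate(service_pool):
--         seen = set()
--         conflict_aps = []
--         for ue in pool:
--             for link in intercell_conflict_links.get(ue, ()):
--                 m = cell_mapping[link]
--                 if m != ap and m not in seen:
--                     seen.add(m)
--                     conflict_aps.append(m)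
--         conflict_ap_neighbors.append(conflict_aps)
--     return conflict_ap_neighbors
-- ===== Notes on version B (the rewrite author's own statement) =====
-- stated objective: simpler
-- what changed: B fuses A's two per-AP phases (collect a deduplicated conflict_links list, then map links to APs) into one nested pass that maps each link to its AP immediately and dedups APs with a seen set, never materializing conflict_links.
import Mathlib
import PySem

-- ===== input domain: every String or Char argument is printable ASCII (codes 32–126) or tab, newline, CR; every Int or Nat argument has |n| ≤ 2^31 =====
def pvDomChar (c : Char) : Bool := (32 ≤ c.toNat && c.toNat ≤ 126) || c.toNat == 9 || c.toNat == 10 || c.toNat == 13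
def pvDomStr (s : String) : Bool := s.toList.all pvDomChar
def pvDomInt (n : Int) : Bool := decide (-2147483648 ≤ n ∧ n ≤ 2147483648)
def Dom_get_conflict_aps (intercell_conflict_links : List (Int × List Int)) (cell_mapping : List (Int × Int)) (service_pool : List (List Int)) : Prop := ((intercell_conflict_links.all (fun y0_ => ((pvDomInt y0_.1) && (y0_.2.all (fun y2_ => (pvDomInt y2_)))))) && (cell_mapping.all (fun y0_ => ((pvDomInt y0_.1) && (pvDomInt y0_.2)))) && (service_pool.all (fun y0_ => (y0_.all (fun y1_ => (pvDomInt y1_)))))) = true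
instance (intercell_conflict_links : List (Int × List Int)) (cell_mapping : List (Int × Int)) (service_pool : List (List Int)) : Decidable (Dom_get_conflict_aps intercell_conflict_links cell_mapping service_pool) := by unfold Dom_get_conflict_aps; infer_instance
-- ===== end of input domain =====

-- B fuses A's two per-AP phases (collect deduped links, then map links to APs) into one
-- nested pass that maps each link to its AP immediately and dedups APs with a seen set.


-- ===== PORT A =====
-- 'if link not in conflict_links: conflict_links.append(link)'
def aDedupStep (cls : List Int) (link : Int) : List Int :=
  if cls.contains link then cls else cls ++ [link]

-- body of 'for ue in service_pool[ap]: if ue in intercell_conflict_links: for link in …'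
def aCollect (icl : List (Int × List Int)) (cls : List Int) (ue : Int) : List Int :=
  match List.lookup ue icl with
  | some links => links.foldl aDedupStep cls
  | none => cls

-- 'if cell_mapping[conflict_link] not in conflict_aps and cell_mapping[conflict_link] != ap: append'
def aMapStep (cm : List (Int × Int)) (ap : Int) (cas : List Int) (link : Int) : List Int :=
  match List.lookup link cm with
  | some m => if !cas.contains m && m != ap then cas ++ [m] else cas
  | none => cas   -- Python raises KeyError here; excluded by Pre_

def get_conflict_aps (intercell_conflict_links : List (Int × List Int)) (cell_mapping : List (Int × Int)) (service_pool : List (List Int)) : List (List Int) :=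
  let K := service_pool.length
  let init : List (List Int) := (List.range K).map (fun _ => ([] : List Int))
  (PySem.List.pyRange 0 (K : Int) 1).foldl
    (fun arr ap =>
      let conflict_links := (PySem.List.pyGetD service_pool ap []).foldl (aCollect intercell_conflict_links) []
      let conflict_aps := conflict_links.foldl (aMapStep cell_mapping ap) []
      arr.set ap.toNat conflict_aps)
    init

-- ===== PORT B =====
-- body of 'for link in …: m = cell_mapping[link]; if m != ap and m not in seen: …'
def bStep (cm : List (Int × Int)) (ap : Int) (st : PySem.Set Int × List Int) (link : Int) : PySem.Set Int × List Int :=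
  match List.lookup link cm with
  | some m => if m != ap && !(PySem.Set.contains st.1 m) then (PySem.Set.add st.1 m, st.2 ++ [m]) else st
  | none => st   -- Python raises KeyError here; excluded by Pre_

def bInner (icl : List (Int × List Int)) (cm : List (Int × Int)) (ap : Int) (pool : List Int) : List Int :=
  (pool.foldl (fun st ue => ((List.lookup ue icl).getD []).foldl (bStep cm ap) st)
    ((PySem.Set.empty : PySem.Set Int), ([] : List Int))).2

def get_conflict_aps_alt (intercell_conflict_links : List (Int × List Int)) (cell_mapping : List (Int × Int)) (service_pool : List (List Int)) : List (List Int) :=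
  (PySem.List.enumerate service_pool).foldl
    (fun res p => res ++ [bInner intercell_conflict_links cell_mapping p.1 p.2]) []

-- ===== PRECONDITION & SPEC =====
-- Pre_ excludes exactly the inputs where Python raises KeyError: some reachable
-- conflict link has no entry in cell_mapping (both A and B raise there).
def Pre_get_conflict_aps (intercell_conflict_links : List (Int × List Int)) (cell_mapping : List (Int × Int)) (service_pool : List (List Int)) : Prop :=
  ∀ pool ∈ service_pool, ∀ ue ∈ pool, ∀ links, List.lookup ue intercell_conflict_links = some links →
    ∀ link ∈ links, (List.lookup link cell_mapping).isSome
instance (intercell_conflict_links : List (Int × List Int)) (cell_mapping : List (Int × Int)) (service_pool : List (List Int)) : Decidable (Pre_get_conflict_aps intercell_conflict_links cell_mapping service_pool) := by unfold Pre_get_conflict_aps; infer_instance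

def pvWitness_get_conflict_aps : (List (Int × List Int)) × (List (Int × Int)) × List (List Int) :=
  ([(0, [1])], [(1, 1), (0, 0)], [[0], [1]])

def Spec_get_conflict_aps (intercell_conflict_links : List (Int × List Int)) (cell_mapping : List (Int × Int)) (service_pool : List (List Int)) (out : List (List Int)) : Prop := out = get_conflict_aps_alt intercell_conflict_links cell_mapping service_pool
instance (intercell_conflict_links : List (Int × List Int)) (cell_mapping : List (Int × Int)) (service_pool : List (List Int)) (out : List (List Int)) : Decidable (Spec_get_conflict_aps intercell_conflict_links cell_mapping service_pool out) := by unfold Spec_get_conflict_aps; infer_instance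

-- ===== CLAIM (what is proved, stated in full; the proofs are below) =====
def Claim_equal_get_conflict_aps : Prop := ∀ (intercell_conflict_links : List (Int × List Int)) (cell_mapping : List (Int × Int)) (service_pool : List (List Int)), Dom_get_conflict_aps intercell_conflict_links cell_mapping service_pool → Pre_get_conflict_aps intercell_conflict_links cell_mapping service_pool → Spec_get_conflict_aps intercell_conflict_links cell_mapping service_pool (get_conflict_aps intercell_conflict_links cell_mapping service_pool)

-- ===== LEMMAS AND PROOFS =====

-- collecting links over a pool is a fold over the flattened link stream
lemma aCollect_flatMap (icl : List (Int × List Int)) :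
    ∀ (pool : List Int) (c : List Int),
      pool.foldl (aCollect icl) c
        = (pool.flatMap (fun ue => (List.lookup ue icl).getD [])).foldl aDedupStep c := by
  intro pool
  induction pool with
  | nil => intro c; rfl
  | cons ue rest ih =>
      intro c
      simp only [List.foldl_cons, List.flatMap_cons, List.foldl_append, ih]
      congr 1
      cases h : List.lookup ue icl <;> simp [aCollect, h]

lemma bStep_flatMap (icl : List (Int × List Int)) (cm : List (Int × Int)) (ap : Int) :
    ∀ (pool : List Int) (st : PySem.Set Int × List Int),
      pool.foldl (fun st ue => ((List.lookup ue icl).getD []).foldl (bStep cm ap) st) st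
        = (pool.flatMap (fun ue => (List.lookup ue icl).getD [])).foldl (bStep cm ap) st := by
  intro pool
  induction pool with
  | nil => intro st; rfl
  | cons ue rest ih => intro st; simp [List.foldl_append, ih]

-- A's link dedup loop is PySem.Set.ofList
lemma aDedup_eq_ofList (L : List Int) : L.foldl aDedupStep [] = PySem.Set.ofList L := by
  rw [PySem.Set.ofList_eq_foldl]
  congr 1

-- aMapStep never removes an element from the accumulator
lemma mem_aMapStep (cm : List (Int × Int)) (ap : Int) (acc : List Int) (l m : Int)
    (hm : m ∈ acc) : m ∈ aMapStep cm ap acc l := by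
  unfold aMapStep
  cases List.lookup l cm with
  | none => exact hm
  | some m' => dsimp only; split <;> simp [hm]

lemma mem_foldl_aMapStep (cm : List (Int × Int)) (ap : Int) :
    ∀ (L : List Int) (acc : List Int) (m : Int), m ∈ acc → m ∈ L.foldl (aMapStep cm ap) acc := by
  intro L
  induction L with
  | nil => intro acc m hm; simpa using hm
  | cons l rest ih =>
      intro acc m hm
      exact ih _ m (mem_aMapStep cm ap acc l m hm)

-- one step on link l records its mapped AP (when it differs from ap)
lemma aMapStep_mem_self (cm : List (Int × Int)) (ap : Int) (acc : List Int) (l m : Int)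
    (hm : List.lookup l cm = some m) (hap : m ≠ ap) : m ∈ aMapStep cm ap acc l := by
  unfold aMapStep
  rw [hm]
  dsimp only
  split
  · simp
  · rename_i hcond
    by_cases hc : m ∈ acc
    · exact hc
    · exact absurd (by simp [hc, hap]) hcond

-- after processing a link once, its mapped AP is recorded (or equals ap)
lemma processed_foldl_aMapStep (cm : List (Int × Int)) (ap : Int) :
    ∀ (L : List Int) (acc : List Int) (l : Int), l ∈ L →
      ∀ m, List.lookup l cm = some m → (m ∈ L.foldl (aMapStep cm ap) acc ∨ m = ap) := by
  intro L
  induction L with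
  | nil => intro acc l h; cases h
  | cons x rest ih =>
      intro acc l hl m hm
      by_cases hap : m = ap
      · exact Or.inr hap
      rcases List.mem_cons.mp hl with h | h
      · subst h
        exact Or.inl (mem_foldl_aMapStep cm ap rest _ m (aMapStep_mem_self cm ap acc l m hm hap))
      · rcases ih (aMapStep cm ap acc x) l h m hm with h' | h'
        · exact Or.inl (by simpa using h')
        · exact Or.inr h'

-- a step on an already-recorded link is a no-op
lemma aMapStep_noop (cm : List (Int × Int)) (ap : Int) (acc : List Int) (l : Int)
    (h : ∀ m, List.lookup l cm = some m → (m ∈ acc ∨ m = ap)) :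
    aMapStep cm ap acc l = acc := by
  unfold aMapStep
  cases hm : List.lookup l cm with
  | none => rfl
  | some m =>
      rcases h m hm with h' | h'
      · simp [h']
      · simp [h', bne]

-- deduplicating links first does not change the AP list
lemma fold_dedup_eq (cm : List (Int × Int)) (ap : Int) :
    ∀ (L : List Int) (acc : List Int),
      (PySem.Set.ofList L).foldl (aMapStep cm ap) acc = L.foldl (aMapStep cm ap) acc := by
  intro L
  induction L using List.reverseRecOn with
  | nil => intro acc; rfl
  | append_singleton rest l ih =>
      intro acc
      rw [PySem.Set.ofList_append_singleton, PySem.Set.add_eq_ite, List.foldl_append]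
      split
      · rename_i hmem
        rw [ih]
        rw [PySem.Set.mem_ofList] at hmem
        simp only [List.foldl_cons, List.foldl_nil]
        exact (aMapStep_noop cm ap _ l
          (fun m hm => processed_foldl_aMapStep cm ap rest acc l hmem m hm)).symm
      · rw [List.foldl_append, ih]

-- B's fused pass keeps seen = conflict_aps and computes exactly A's aMapStep fold
lemma bStep_fold_eq (cm : List (Int × Int)) (ap : Int) :
    ∀ (L : List Int) (aps : List Int),
      L.foldl (bStep cm ap) (aps, aps) = (L.foldl (aMapStep cm ap) aps, L.foldl (aMapStep cm ap) aps) := by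
  intro L
  induction L with
  | nil => intro aps; rfl
  | cons l rest ih =>
      intro aps
      simp only [List.foldl_cons]
      have hstep : bStep cm ap (aps, aps) l = (aMapStep cm ap aps l, aMapStep cm ap aps l) := by
        unfold bStep aMapStep
        cases hm : List.lookup l cm with
        | none => rfl
        | some m =>
            dsimp only
            have hc : (m != ap && !PySem.Set.contains aps m) = (!aps.contains m && m != ap) := by
              rw [Bool.and_comm]
              simp [PySem.Set.contains_eq_listContains]
            rw [hc]
            split
            · rename_i ht
              have hnm : m ∉ aps := by
                simp only [Bool.and_eq_true, Bool.not_eq_true'] at ht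
                simpa using ht.1
              rw [PySem.Set.add_of_not_mem hnm]
            · rfl
      rw [hstep, ih]

-- the two inner per-AP computations agree
lemma inner_eq (icl : List (Int × List Int)) (cm : List (Int × Int)) (ap : Int) (pool : List Int) :
    (pool.foldl (aCollect icl) []).foldl (aMapStep cm ap) [] = bInner icl cm ap pool := by
  rw [aCollect_flatMap, aDedup_eq_ofList, fold_dedup_eq]
  unfold bInner
  rw [bStep_flatMap]
  have : ((PySem.Set.empty : PySem.Set Int), ([] : List Int)) = (([] : List Int), ([] : List Int)) := rfl
  rw [this, bStep_fold_eq]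

-- writing F i into slot i of a preallocated list, for indices below an appended tail
lemma foldl_set_append (F : Int → List Int) :
    ∀ (L : List Int) (arr : List (List Int)) (x : List Int),
      (∀ i ∈ L, 0 ≤ i ∧ i.toNat < arr.length) →
      L.foldl (fun arr ap => arr.set ap.toNat (F ap)) (arr ++ [x])
        = (L.foldl (fun arr ap => arr.set ap.toNat (F ap)) arr) ++ [x] := by
  intro L
  induction L with
  | nil => intro arr x _; rfl
  | cons i rest ih =>
      intro arr x hb
      simp only [List.foldl_cons]
      rw [List.set_append_left _ _ (hb i (by simp)).2]
      apply ih
      intro j hj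
      have := hb j (by simp [hj])
      simpa [List.length_set] using this

-- A's preallocate-and-set loop over range(K) is a map over range K
lemma foldl_set_range (F : Int → List Int) :
    ∀ (n : Nat),
      (PySem.List.pyRange 0 (n : Int) 1).foldl (fun arr ap => arr.set ap.toNat (F ap))
          ((List.range n).map (fun _ => ([] : List Int)))
        = (List.range n).map (fun (i : Nat) => F (i : Int)) := by
  intro n
  induction n with
  | zero => simp [PySem.List.pyRange_one_eq_nil]
  | succ n ih =>
      have hcast : ((n + 1 : Nat) : Int) = (n : Int) + 1 := by push_cast; ring
      rw [hcast, PySem.List.pyRange_one_succ_right (by positivity)]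
      rw [List.foldl_append]
      simp only [List.foldl_cons, List.foldl_nil]
      rw [List.range_succ, List.map_append, List.map_append]
      simp only [List.map_cons, List.map_nil]
      have hb : ∀ i ∈ PySem.List.pyRange 0 (n : Int) 1,
          0 ≤ i ∧ i.toNat < ((List.range n).map (fun _ => ([] : List Int))).length := by
        intro i hi
        have h2 := (PySem.List.mem_pyRange_one).mp hi
        refine ⟨h2.1, ?_⟩
        simp only [List.length_map, List.length_range]
        omega
      rw [foldl_set_append F _ _ ([] : List Int) hb, ih]
      have hlen : ((List.range n).map (fun (i : Nat) => F (i : Int))).length = n := by simp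
      rw [show ((n : Int)).toNat = n from Int.toNat_natCast n]
      rw [List.set_append_right _ _ (by simp [hlen])]
      simp [hlen]

-- ===== VERDICT (by name: the statement is the Claim_ definition above) =====
theorem get_conflict_aps_spec : Claim_equal_get_conflict_aps := by
  intro icl cm sp _ _
  unfold Spec_get_conflict_aps get_conflict_aps get_conflict_aps_alt
  simp only []
  rw [foldl_set_range (fun ap =>
        ((PySem.List.pyGetD sp ap []).foldl (aCollect icl) []).foldl (aMapStep cm ap) [])]
  rw [PySem.List.foldl_append_singleton_eq_map, List.nil_append]
  rw [PySem.List.enumerate_eq_map_pyRange (d := []), List.map_map]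
  rw [show PySem.List.len sp = ((sp.length : Nat) : Int) from by simp [PySem.List.len_eq]]
  rw [PySem.List.pyRange_zero_nat, List.map_map]
  apply List.map_congr_left
  intro i _
  simp only [Function.comp_apply]
  exact inner_eq icl cm (i : Int) (PySem.List.pyGetD sp (i : Int) [])
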